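-- pv_equiv track=rewrite | github.com/Emicatte/feerouter-dapp | contracts/stress_mega_batch_reconciliation.py | compute_amounts
-- ===== SOURCE A (Python) =====
-- FEE_BPS        = 50        # 0.5%
--
-- BPS_DENOM      = 10_000
--
-- def compute_amounts(bps_list, total_wei):
--     """
--     Compute exact wei amounts from BPS allocations.
--     Last recipient gets the remainder to ensure zero dust.
--     """
--     fee_wei          = total_wei * FEE_BPS // BPS_DENOM
--     distributable_wei = total_wei - fee_wei
--
--     amounts = []
--     running_sum = 0
--     for i, bps in enumerate(bps_list):
--         if i < len(bps_list) - 1: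
--             amt = distributable_wei * bps // BPS_DENOM
--             amounts.append(amt)
--             running_sum += amt
--         else:
--             # Last recipient gets remainder — zero dust guarantee
--             amounts.append(distributable_wei - running_sum)
--
--     assert sum(amounts) == distributable_wei, (
--         f"Amount sum mismatch: {sum(amounts)} != {distributable_wei}"
--     )
--     return amounts, fee_wei, distributable_wei
-- ===== SOURCE B (Python) =====
-- FEE_BPS = 50
-- BPS_DENOM = 10_000
--
-- def compute_amounts(bps_list, total_wei):
--     fee_wei = total_wei * FEE_BPS // BPS_DENOM
--     distributable_wei = total_wei - fee_wei
--
--     # Build the cumulative payout boundaries: 0, then the running boundary after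
--     # each proportional share, and finally distributable_wei itself as the last
--     # boundary (so the final recipient's slice ends exactly at the total).
--     boundaries = [0]
--     total = 0
--     for bps in bps_list[:-1]:
--         total += distributable_wei * bps // BPS_DENOM
--         boundaries.append(total)
--     if bps_list:
--         boundaries.append(distributable_wei)
--
--     # Each amount is the width of one slice between consecutive boundaries.
--     amounts = [hi - lo for lo, hi in zip(boundaries, boundaries[1:])]
--     return amounts, fee_wei, distributable_wei
-- ===== Notes on version B (the rewrite author's own statement) =====
-- stated objective: alternative
-- what changed: Replaces A's single pass that appends amounts directly under an index-vs-length branch with a boundary representation: a first pass builds the list of cumulative payout boundaries (0, running boundaries, then distributable_wei itself as the closing boundary), and a second pass recovers each amount as the width between consecutive boundaries via zip; no per-element last-position test and no remainder subtraction appears.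
import Mathlib
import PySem

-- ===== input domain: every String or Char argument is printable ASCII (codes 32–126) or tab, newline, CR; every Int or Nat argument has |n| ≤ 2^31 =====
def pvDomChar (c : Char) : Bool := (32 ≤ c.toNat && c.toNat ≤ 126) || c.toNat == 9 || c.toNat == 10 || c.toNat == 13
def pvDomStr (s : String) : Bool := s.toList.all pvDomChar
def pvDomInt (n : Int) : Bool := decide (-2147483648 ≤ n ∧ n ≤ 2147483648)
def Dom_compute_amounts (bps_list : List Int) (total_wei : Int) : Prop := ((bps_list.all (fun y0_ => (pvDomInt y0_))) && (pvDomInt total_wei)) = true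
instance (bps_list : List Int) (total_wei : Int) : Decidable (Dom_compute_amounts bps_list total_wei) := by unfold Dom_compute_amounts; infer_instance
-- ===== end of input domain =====

-- B builds cumulative payout boundaries (closing boundary = distributable_wei) and takes
-- consecutive differences via zip, instead of A's indexed loop with a last-element branch
-- and running_sum (objective: alternative decomposition, same cost).

-- ===== PORT A =====
-- the loop over enumerate(bps_list) with its (amounts, running_sum) state
def compute_amounts (bps_list : List Int) (total_wei : Int) : List Int × Int × Int :=
  let fee_wei := PySem.Int.floordiv (total_wei * 50) 10000
  let distributable_wei := total_wei - fee_wei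
  let st := (PySem.List.enumerate bps_list).foldl
    (fun (st : List Int × Int) (p : Int × Int) =>
      if p.1 < (bps_list.length : Int) - 1 then
        let amt := PySem.Int.floordiv (distributable_wei * p.2) 10000
        (st.1 ++ [amt], st.2 + amt)
      else
        (st.1 ++ [distributable_wei - st.2], st.2))
    ([], 0)
  -- the assert holds on every input admitted by Pre_ (see Pre_compute_amounts)
  (st.1, fee_wei, distributable_wei)

-- ===== PORT B =====
def compute_amounts_alt (bps_list : List Int) (total_wei : Int) : List Int × Int × Int :=
  let fee_wei := PySem.Int.floordiv (total_wei * 50) 10000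
  let distributable_wei := total_wei - fee_wei
  let st := (PySem.List.slice bps_list none (some (-1))).foldl
    (fun (p : List Int × Int) b =>
      let t := p.2 + PySem.Int.floordiv (distributable_wei * b) 10000
      (p.1 ++ [t], t)) ([0], 0)
  let boundaries := if bps_list.isEmpty then st.1 else st.1 ++ [distributable_wei]
  let amounts := (boundaries.zip (PySem.List.slice boundaries (some 1) none)).map
    (fun p => p.2 - p.1)
  (amounts, fee_wei, distributable_wei)

-- ===== PRECONDITION & SPEC =====
-- A's final assert fails (AssertionError) exactly when bps_list is empty and the
-- distributable amount is nonzero; Pre_ excludes exactly those inputs.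
def Pre_compute_amounts (bps_list : List Int) (total_wei : Int) : Prop :=
  bps_list ≠ [] ∨ total_wei - PySem.Int.floordiv (total_wei * 50) 10000 = 0
instance (bps_list : List Int) (total_wei : Int) : Decidable (Pre_compute_amounts bps_list total_wei) := by unfold Pre_compute_amounts; infer_instance
def pvWitness_compute_amounts : List Int × Int := ([5000, 5000], 1000000)

def Spec_compute_amounts (bps_list : List Int) (total_wei : Int) (out : List Int × Int × Int) : Prop := out = compute_amounts_alt bps_list total_wei
instance (bps_list : List Int) (total_wei : Int) (out : List Int × Int × Int) : Decidable (Spec_compute_amounts bps_list total_wei out) := by unfold Spec_compute_amounts; infer_instance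

-- ===== CLAIM =====
def Claim_equal_compute_amounts : Prop := ∀ (bps_list : List Int) (total_wei : Int), Dom_compute_amounts bps_list total_wei → Pre_compute_amounts bps_list total_wei → Spec_compute_amounts bps_list total_wei (compute_amounts bps_list total_wei)

-- ===== LEMMAS AND PROOFS =====

theorem foldA_prefix (d : Int) (n : Int) (xs : List Int) (s : Int) (acc : List Int) (run : Int)
    (h : s + xs.length ≤ n - 1) :
    (PySem.List.enumerate xs s).foldl
      (fun (st : List Int × Int) (p : Int × Int) =>
        if p.1 < n - 1 then
          (st.1 ++ [PySem.Int.floordiv (d * p.2) 10000], st.2 + PySem.Int.floordiv (d * p.2) 10000)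
        else
          (st.1 ++ [d - st.2], st.2))
      (acc, run)
    = (acc ++ xs.map (fun b => PySem.Int.floordiv (d * b) 10000),
       run + (xs.map (fun b => PySem.Int.floordiv (d * b) 10000)).sum) := by
  induction xs generalizing s acc run with
  | nil => simp [PySem.List.enumerate_nil]
  | cons x xs ih =>
    simp only [List.length_cons] at h
    have hs : s < n - 1 := by push_cast at h; omega
    rw [PySem.List.enumerate_cons, List.foldl_cons]
    simp only []
    rw [if_pos (show ((s, x).1 : Int) < n - 1 from hs)]
    rw [ih (s + 1) _ _ (by push_cast at h ⊢; omega)]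
    simp [List.append_assoc, add_assoc]

-- the cumulative boundaries B's first loop produces, starting after boundary t
def pvSums (d t : Int) : List Int → List Int
  | [] => []
  | b :: bs => (t + PySem.Int.floordiv (d * b) 10000)
      :: pvSums d (t + PySem.Int.floordiv (d * b) 10000) bs

theorem foldB_sums (d : Int) (xs : List Int) : ∀ (c : List Int) (t : Int),
    xs.foldl (fun (p : List Int × Int) b =>
        let t' := p.2 + PySem.Int.floordiv (d * b) 10000
        (p.1 ++ [t'], t')) (c, t)
    = (c ++ pvSums d t xs, t + (xs.map (fun b => PySem.Int.floordiv (d * b) 10000)).sum) := by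
  induction xs with
  | nil => simp [pvSums]
  | cons b bs ih =>
    intro c t
    simp only [List.foldl_cons, pvSums, ih, List.map_cons, List.sum_cons]
    simp [add_assoc]

theorem zip_diff_sums (d : Int) (xs : List Int) : ∀ (t D : Int),
    ((t :: (pvSums d t xs ++ [D])).zip (pvSums d t xs ++ [D])).map (fun p => p.2 - p.1)
    = xs.map (fun b => PySem.Int.floordiv (d * b) 10000)
      ++ [D - t - (xs.map (fun b => PySem.Int.floordiv (d * b) 10000)).sum] := by
  induction xs with
  | nil => intro t D; simp [pvSums]
  | cons b bs ih =>
    intro t D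
    simp only [pvSums, List.cons_append, List.zip_cons_cons, List.map_cons,
      List.sum_cons, ih]
    refine congrArg₂ List.cons (by ring) (congrArg _ (by congr 1; ring))

theorem compute_amounts_eq_alt (bps_list : List Int) (total_wei : Int)
    (h : bps_list ≠ []) :
    compute_amounts bps_list total_wei = compute_amounts_alt bps_list total_wei := by
  rcases List.eq_nil_or_concat bps_list with rfl | ⟨xs, x, rfl⟩
  · exact absurd rfl h
  simp only [compute_amounts, compute_amounts_alt, List.concat_eq_append]
  rw [PySem.List.enumerate_append, List.foldl_append]
  rw [foldA_prefix (total_wei - PySem.Int.floordiv (total_wei * 50) 10000) ((xs ++ [x]).length : Int) xs 0 [] 0 (by simp)]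
  rw [PySem.List.enumerate_cons, PySem.List.enumerate_nil, List.foldl_cons, List.foldl_nil]
  simp only []
  rw [if_neg (show ¬(((0 + (xs.length : Int), x).1) < ((xs ++ [x]).length : Int) - 1) by simp)]
  have hs : PySem.List.slice (xs ++ [x]) none (some (-1)) = xs := by
    have := PySem.List.slice_to_neg_natCast (xs := xs ++ [x]) (k := 1) (by norm_num)
    simp at this
    simpa using this
  rw [hs, foldB_sums]
  have hne : (xs ++ [x]).isEmpty = false := by simp
  rw [hne]
  simp only [Bool.false_eq_true, if_false, List.nil_append]
  have hb : (([(0 : Int)] ++ pvSums (total_wei - PySem.Int.floordiv (total_wei * 50) 10000) 0 xs) ++ [total_wei - PySem.Int.floordiv (total_wei * 50) 10000])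
      = (0 : Int) :: (pvSums (total_wei - PySem.Int.floordiv (total_wei * 50) 10000) 0 xs ++ [total_wei - PySem.Int.floordiv (total_wei * 50) 10000]) := by
    simp
  have hdrop : PySem.List.slice ((0 : Int) :: (pvSums (total_wei - PySem.Int.floordiv (total_wei * 50) 10000) 0 xs ++ [total_wei - PySem.Int.floordiv (total_wei * 50) 10000])) (some 1) none
      = pvSums (total_wei - PySem.Int.floordiv (total_wei * 50) 10000) 0 xs ++ [total_wei - PySem.Int.floordiv (total_wei * 50) 10000] := by
    have := PySem.List.slice_from_natCast (xs := (0 : Int) :: (pvSums (total_wei - PySem.Int.floordiv (total_wei * 50) 10000) 0 xs ++ [total_wei - PySem.Int.floordiv (total_wei * 50) 10000])) (a := 1)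
    simpa using this
  rw [hb, hdrop, zip_diff_sums]
  simp

-- ===== VERDICT =====
theorem compute_amounts_spec : Claim_equal_compute_amounts := by
  intro bps_list total_wei _ hpre
  unfold Spec_compute_amounts
  rcases bps_list with _ | ⟨b, bs⟩
  · rcases hpre with h | h
    · exact absurd rfl h
    · simp [compute_amounts, compute_amounts_alt, PySem.List.enumerate_nil, PySem.List.slice]
  · exact compute_amounts_eq_alt _ _ (by simp)
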